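-- pv_equiv track=rewrite | github.com/hugo-araya/compu | analiza_datos.py | juntaporagno
-- ===== SOURCE A (Python) =====
-- def juntaporagno(lista):
--     x = []
--     y = []
--     lista.sort()
--     for elem in lista:
--         if elem not in x:
--             x.append(elem)
--     for elem in x:
--         numero = lista.count(elem)
--         y.append(numero)
--     return x, y
-- ===== SOURCE B (Python) =====
-- def juntaporagno(lista):
--     lista.sort()
--     x = []
--     y = []
--     n = len(lista)
--     i = 0
--     while i < n:
--         h = lista[i]
--         j = i + 1
--         while j < n and lista[j] == h:
--             j += 1
--         x.append(h)
--         y.append(j - i)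
--         i = j
--     return x, y
-- ===== Notes on version B (the rewrite author's own statement) =====
-- stated objective: faster
-- what changed: Replaced the quadratic membership-test dedup pass plus a lista.count scan per unique value by a single linear sweep over the sorted list that emits each run's head and length.
import Mathlib
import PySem

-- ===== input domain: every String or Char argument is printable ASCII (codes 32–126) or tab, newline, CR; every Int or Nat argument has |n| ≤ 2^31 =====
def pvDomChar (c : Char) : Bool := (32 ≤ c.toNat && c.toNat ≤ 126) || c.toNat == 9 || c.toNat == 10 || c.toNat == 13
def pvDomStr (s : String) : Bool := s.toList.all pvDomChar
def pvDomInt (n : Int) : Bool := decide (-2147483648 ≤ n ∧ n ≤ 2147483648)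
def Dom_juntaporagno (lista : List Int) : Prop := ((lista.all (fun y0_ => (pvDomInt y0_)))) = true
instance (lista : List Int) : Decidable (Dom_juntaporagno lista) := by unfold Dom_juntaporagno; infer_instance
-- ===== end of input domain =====

-- B replaces A's quadratic dedup-and-count passes by one linear sweep over the sorted
-- list counting consecutive runs (objective: faster). Both A and B sort `lista` in
-- place; the equivalence proved here is about the RETURN value only.

-- ===== PORT A =====
def juntaporagno (lista : List Int) : List Int × List Int :=
  let l := PySem.List.sorted lista (fun z => z) false        -- lista.sort()
  let x := l.foldl (fun x elem => if elem ∈ x then x else x ++ [elem]) []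
  let y := x.foldl (fun y elem => y ++ [(PySem.List.count l elem : Int)]) []
  (x, y)

-- ===== PORT B =====
-- inner while: j = i+1; while j < n and lista[j] == h: j += 1  — counts the rest of h's run
def runLenB (h : Int) : List Int → Nat
  | [] => 0
  | a :: t => if a = h then runLenB h t + 1 else 0

-- outer while over the index i, transcribed as recursion on the remaining suffix lista[i:]
-- (j - i = runLenB h t + 1; advancing i to j = dropping the run)
def goB (s : List Int) (x y : List Int) : List Int × List Int :=
  match s with
  | [] => (x, y)
  | h :: t =>
      let k := runLenB h t
      goB (t.drop k) (x ++ [h]) (y ++ [(k : Int) + 1])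
termination_by s.length
decreasing_by
  simp [List.length_drop]

def juntaporagno_alt (lista : List Int) : List Int × List Int :=
  goB (PySem.List.sorted lista (fun z => z) false) [] []

-- ===== PRECONDITION & SPEC =====
def Spec_juntaporagno (lista : List Int) (out : List Int × List Int) : Prop := out = juntaporagno_alt lista
instance (lista : List Int) (out : List Int × List Int) : Decidable (Spec_juntaporagno lista out) := by unfold Spec_juntaporagno; infer_instance

-- ===== CLAIM (what is proved, stated in full; the proofs are below) =====
def Claim_equal_juntaporagno : Prop := ∀ (lista : List Int), Dom_juntaporagno lista → Spec_juntaporagno lista (juntaporagno lista)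

-- ===== LEMMAS AND PROOFS =====

-- run-length encoding of a list, the common characterisation of both ports
def runsB : List Int → List Int × List Int
  | [] => ([], [])
  | h :: t =>
      let k := runLenB h t
      let p := runsB (t.drop k)
      (h :: p.1, ((k : Int) + 1) :: p.2)
termination_by s => s.length
decreasing_by
  simp [List.length_drop]

lemma goB_eq_runsB : ∀ (s x y : List Int), goB s x y = (x ++ (runsB s).1, y ++ (runsB s).2) := by
  intro s x y
  induction s, x, y using goB.induct with
  | case1 x y => simp [goB, runsB]
  | case2 x y h t k ih =>
      rw [goB, runsB]
      simpa using ih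

lemma mem_take_runLenB (h : Int) : ∀ (t : List Int), ∀ e ∈ t.take (runLenB h t), e = h := by
  intro t
  induction t with
  | nil => simp [runLenB]
  | cons a t ih =>
      by_cases ha : a = h
      · subst ha
        simp only [runLenB, if_true]
        intro e he
        rcases List.mem_cons.mp he with h1 | h1
        · exact h1
        · exact ih e h1
      · simp [runLenB, ha]

lemma lt_of_mem_drop_runLenB (h : Int) : ∀ (t : List Int), (h :: t).Pairwise (· ≤ ·) →
    ∀ e ∈ t.drop (runLenB h t), h < e := by
  intro t
  induction t with
  | nil => simp [runLenB]
  | cons a t ih =>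
      intro hp e he
      rcases List.pairwise_cons.mp hp with ⟨hle, hpt⟩
      by_cases ha : a = h
      · subst ha
        simp only [runLenB, if_true] at he
        exact ih hpt e he
      · simp only [runLenB, if_neg ha, List.drop_zero] at he
        have h1 : h ≤ e := hle e he
        rcases List.mem_cons.mp he with h2 | h2
        · subst h2; exact lt_of_le_of_ne h1 (fun hh => ha hh.symm)
        · have ha2 : h < a := lt_of_le_of_ne (hle a List.mem_cons_self) (fun hh => ha hh.symm)
          exact lt_of_lt_of_le ha2 ((List.pairwise_cons.mp hpt).1 e h2)

lemma count_eq_runLenB (h : Int) : ∀ (t : List Int), (h :: t).Pairwise (· ≤ ·) →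
    t.count h = runLenB h t := by
  intro t
  induction t with
  | nil => simp [runLenB]
  | cons a t ih =>
      intro hp
      rcases List.pairwise_cons.mp hp with ⟨hle, hpt⟩
      by_cases ha : a = h
      · subst ha
        rw [List.count_cons_self, ih hpt]
        simp [runLenB]
      · have hall : ∀ e ∈ a :: t, h < e := by
          intro e he
          have h1 : h ≤ e := hle e he
          rcases List.mem_cons.mp he with h2 | h2
          · subst h2; exact lt_of_le_of_ne h1 (fun hh => ha hh.symm)
          · have ha2 : h < a := lt_of_le_of_ne (hle a List.mem_cons_self) (fun hh => ha hh.symm)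
            exact lt_of_lt_of_le ha2 ((List.pairwise_cons.mp hpt).1 e h2)
        have : h ∉ a :: t := fun hm => lt_irrefl h (hall h hm)
        simp [runLenB, ha, List.count_eq_zero.mpr this]

lemma count_drop_eq (h e : Int) (t : List Int) (he : e ≠ h) :
    t.count e = (t.drop (runLenB h t)).count e := by
  conv_lhs => rw [← List.take_append_drop (runLenB h t) t]
  rw [List.count_append]
  have : (t.take (runLenB h t)).count e = 0 := by
    refine List.count_eq_zero.mpr (fun hm => he (mem_take_runLenB h t e hm))
  omega

lemma runsB_fst_subset : ∀ (s : List Int), ∀ e ∈ (runsB s).1, e ∈ s := by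
  intro s
  induction s using runsB.induct with
  | case1 => simp [runsB]
  | case2 h t k ih =>
      rw [runsB]
      intro e he
      rcases List.mem_cons.mp he with h1 | h1
      · subst h1; exact List.mem_cons_self
      · exact List.mem_cons_of_mem _ (List.drop_subset _ _ (ih e h1))

lemma foldl_ded_stay : ∀ (l acc : List Int), (∀ e ∈ l, e ∈ acc) →
    l.foldl (fun x elem => if elem ∈ x then x else x ++ [elem]) acc = acc := by
  intro l
  induction l with
  | nil => simp
  | cons a l ih =>
      intro acc hmem
      rw [List.foldl_cons, if_pos (hmem a List.mem_cons_self)]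
      exact ih acc (fun e he => hmem e (List.mem_cons_of_mem _ he))

lemma dedup_eq_runsB_fst : ∀ (s : List Int), s.Pairwise (· ≤ ·) → ∀ (acc : List Int),
    (∀ e ∈ s, e ∉ acc) →
    s.foldl (fun x elem => if elem ∈ x then x else x ++ [elem]) acc = acc ++ (runsB s).1 := by
  intro s
  induction s using runsB.induct with
  | case1 => simp [runsB]
  | case2 h t k ih =>
      intro hp acc hacc
      rw [List.foldl_cons, if_neg (hacc h List.mem_cons_self)]
      conv_lhs => rw [← List.take_append_drop (runLenB h t) t, List.foldl_append]
      have hstay : (t.take (runLenB h t)).foldl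
          (fun x elem => if elem ∈ x then x else x ++ [elem]) (acc ++ [h]) = acc ++ [h] :=
        foldl_ded_stay _ _ (fun e he => by
          rw [mem_take_runLenB h t e he]; exact List.mem_append_right _ List.mem_cons_self)
      rw [hstay]
      have hpt : (t.drop (runLenB h t)).Pairwise (· ≤ ·) :=
        List.Pairwise.sublist (List.drop_sublist _ _) ((List.pairwise_cons.mp hp).2)
      have hnot : ∀ e ∈ t.drop (runLenB h t), e ∉ acc ++ [h] := by
        intro e he hmem
        have hlt : h < e := lt_of_mem_drop_runLenB h t hp e he
        rcases List.mem_append.mp hmem with h1 | h1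
        · exact hacc e (List.mem_cons_of_mem _ (List.drop_subset _ _ he)) h1
        · simp at h1; omega
      rw [ih hpt (acc ++ [h]) hnot, runsB]
      simp
      rfl

lemma counts_eq_runsB_snd : ∀ (s : List Int), s.Pairwise (· ≤ ·) →
    (runsB s).1.map (fun e => (PySem.List.count s e : Int)) = (runsB s).2 := by
  intro s
  induction s using runsB.induct with
  | case1 => simp [runsB]
  | case2 h t k ih =>
      intro hp
      have hpt : (t.drop (runLenB h t)).Pairwise (· ≤ ·) :=
        List.Pairwise.sublist (List.drop_sublist _ _) ((List.pairwise_cons.mp hp).2)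
      rw [runsB]
      simp only [List.map_cons]
      refine congrArg₂ List.cons ?_ ?_
      · have h2 := count_eq_runLenB h t hp
        simp [PySem.List.count_eq, List.count_cons_self, h2]
      · rw [List.map_congr_left (fun e he => ?_), ih hpt]
        have hmem : e ∈ t.drop (runLenB h t) := runsB_fst_subset _ e he
        have hlt : h < e := lt_of_mem_drop_runLenB h t hp e hmem
        have hne : e ≠ h := by omega
        have hco : (h :: t).count e = (t.drop (runLenB h t)).count e := by
          have h1 := count_drop_eq h e t hne
          simpa [List.count_cons, Ne.symm hne] using h1
        simp [PySem.List.count_eq, hco]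
        rfl

-- ===== VERDICT (by name: the statement is the Claim_ definition above) =====
theorem juntaporagno_spec : Claim_equal_juntaporagno := by
  intro lista _
  unfold Spec_juntaporagno juntaporagno juntaporagno_alt
  dsimp only
  have hp : (PySem.List.sorted lista (fun z => z) false).Pairwise (· ≤ ·) := by
    simpa using PySem.List.sorted_pairwise (xs := lista) (key := fun z => z)
  rw [goB_eq_runsB]
  rw [dedup_eq_runsB_fst _ hp [] (by simp)]
  rw [PySem.List.foldl_append_singleton_eq_map]
  simp only [List.nil_append]
  rw [counts_eq_runsB_snd _ hp]
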